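-- pv_equiv track=rewrite | github.com/terweh/hello-world | 2021/day16/script.py | literal
-- ===== SOURCE A (Python) =====
-- def split(x, y):
--     return [x[i:i+y] for i in range(0, len(x), y)]
--
-- def literal(rest):
--     bits = split(rest, 5)
--     string = ""
--     number = ""
--     for i, bit in enumerate(bits):
--         string += bit[1:]
--         if bit[0] == "0":
--             number = string
--             string = "".join(bits[i+1:])
--             break
--     return [int(number, 2)], string
-- ===== SOURCE B (Python) =====
-- def literal(rest):
--     # stage 1: locate the start of the terminating group (the first 5-aligned '0')
--     for k in range(0, len(rest), 5):
--         if rest[k] == "0":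
--             break
--     else:
--         raise ValueError("unterminated literal")
--     # stage 2: the payload is every non-header character up to the end of that group
--     number = "".join(rest[j] for j in range(min(k + 5, len(rest))) if j % 5)
--     return [int(number, 2)], rest[k + 5:]
-- ===== Notes on version B (the rewrite author's own statement) =====
-- stated objective: simpler
-- what changed: B replaces A's single pass that materializes a 5-char chunk list and accumulates the payload string while scanning (with a join of the leftover chunks) by two staged passes: first locate the terminating group by probing only the 5-aligned header positions, then extract the payload in one index comprehension (j % 5 != 0) and take the remainder as a direct suffix slice.
-- outside the precondition, e.g. on literal('0 011'): A returns ([3], ''), B returns ([3], ''); on literal('01_01'): A returns ([5], ''), B returns ([5], ''); on literal('0'): A raises ValueError, B raises ValueError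
import Mathlib
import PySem

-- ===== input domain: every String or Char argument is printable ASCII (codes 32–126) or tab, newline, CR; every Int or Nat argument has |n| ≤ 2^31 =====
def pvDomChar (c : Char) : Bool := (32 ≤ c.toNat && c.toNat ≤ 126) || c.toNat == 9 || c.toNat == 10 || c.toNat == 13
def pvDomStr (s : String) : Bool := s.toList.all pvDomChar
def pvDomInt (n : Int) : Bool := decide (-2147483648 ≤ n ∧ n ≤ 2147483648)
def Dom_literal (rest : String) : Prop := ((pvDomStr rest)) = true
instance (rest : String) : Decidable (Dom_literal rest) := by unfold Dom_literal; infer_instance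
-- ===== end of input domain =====

-- B replaces A's chunk-list pass (accumulate payload while scanning, join leftover chunks) by two
-- staged passes: locate the terminating 5-aligned '0' header, then extract the payload by an index
-- comprehension and the remainder by a suffix slice (objective: simpler).


-- ===== PORT A =====
-- split(x, y) = [x[i:i+y] for i in range(0, len(x), y)]
def pySplit (x : List Char) (y : Int) : List (List Char) :=
  (PySem.List.pyRange 0 (x.length : Int) y).map
    (fun i => PySem.List.slice x (some i) (some (i + y)))

-- the 'for i, bit in enumerate(bits)' loop of A; the recursion's tail IS bits[i+1:], so
-- ''.join(bits[i+1:]) is bits.flatten.  bit[0] is pyGetD (chunks are nonempty: IndexError impossible).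
def litLoopA : List (List Char) → List Char → List Char → List Char × List Char
  | [], string, number => (number, string)
  | bit :: bits, string, number =>
    let string := string ++ PySem.List.slice bit (some 1) none
    if PySem.List.pyGetD bit 0 ' ' = '0' then (string, bits.flatten)
    else litLoopA bits string number

def literal (rest : String) : List Int × String :=
  let bits := pySplit rest.toList 5
  let p := litLoopA bits [] []
  -- int(number, 2): none = ValueError, excluded by Pre_literal
  match PySem.Int.ofCharsBase? p.1 2 with
  | some n => ([n], String.ofList p.2)
  | none => ([], String.ofList p.2)

-- ===== PORT B =====
-- stage 1 of Source B: 'for k in range(0, len(rest), 5): if rest[k] == "0": break / else: raise',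
-- as a recursion over the range list; none = the for/else ValueError.  k is always in range,
-- so rest[k] is pyGetD with an irrelevant default.
def findTerm : List Int → List Char → Option Int
  | [], _ => none
  | k :: ks, s => if PySem.List.pyGetD s k ' ' = '0' then some k else findTerm ks s

-- stage 2 of Source B: "".join(rest[j] for j in range(min(k + 5, len(rest))) if j % 5)
-- (j ranges over non-negative ints, where Lean's Int % agrees with Python's %; exact here)
def payloadB (s : List Char) (k : Int) : List Char :=
  ((PySem.List.pyRange 0 (min (k + 5) (s.length : Int)) 1).filter
      (fun j => ¬ j % 5 = 0)).map (fun j => PySem.List.pyGetD s j ' ')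

def literal_alt (rest : String) : List Int × String :=
  match findTerm (PySem.List.pyRange 0 (rest.toList.length : Int) 5) rest.toList with
  | none => ([], "")  -- raise ValueError: excluded by Pre_literal
  | some k =>
    -- int(number, 2): none = ValueError, excluded by Pre_literal
    match PySem.Int.ofCharsBase? (payloadB rest.toList k) 2 with
    | some n => ([n], String.ofList (PySem.List.slice rest.toList (some (k + 5)) none))
    | none => ([], String.ofList (PySem.List.slice rest.toList (some (k + 5)) none))

-- ===== PRECONDITION & SPEC =====
-- Pre_ is the function's real domain: the first 5-aligned '0' (the terminating group) exists, the
-- payload characters up to and including that group are binary digits, and the literal is not the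
-- bare "0" (there A raises via int('',2)).  Outside Pre_ A raises ValueError, except for exotic
-- strings exploiting int()'s whitespace/underscore leniency (e.g. "0 011"), on which both programs
-- still return the same value (the payload strings are built identically) — excluded only because
-- the proof does not characterise int()'s lenient parsing.
def Pre_literal (rest : String) : Prop :=
  ∃ k, k < rest.toList.length ∧ k % 5 = 0 ∧ rest.toList[k]? = some '0' ∧
    (∀ j, j < k → j % 5 = 0 → rest.toList[j]? ≠ some '0') ∧
    (∀ j, j < rest.toList.length → j < k + 5 → j % 5 ≠ 0 →
        rest.toList[j]? = some '0' ∨ rest.toList[j]? = some '1') ∧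
    ¬(k = 0 ∧ rest.toList.length = 1)
instance (rest : String) : Decidable (Pre_literal rest) := by unfold Pre_literal; infer_instance
def pvWitness_literal : String := "01"
def Spec_literal (rest : String) (out : List Int × String) : Prop := out = literal_alt rest
instance (rest : String) (out : List Int × String) : Decidable (Spec_literal rest out) := by unfold Spec_literal; infer_instance

-- ===== CLAIM (what is proved, stated in full; the proofs are below) =====
def Claim_equal_literal : Prop := ∀ (rest : String), Dom_literal rest → Pre_literal rest → Spec_literal rest (literal rest)

-- ===== LEMMAS AND PROOFS =====

-- proof-side canonical payload: the non-5-aligned characters among the first m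
def payN (t : List Char) (m : Nat) : List Char :=
  ((List.range m).filter (fun j => ¬ j % 5 = 0)).map (fun j => t.getD j ' ')

theorem map_range_getD (t : List Char) (d : Char) (n : Nat) (h : n ≤ t.length) :
    (List.range n).map (fun j => t.getD j d) = t.take n := by
  induction n with
  | zero => simp
  | succ n ih =>
    rw [List.range_succ, List.map_append, ih (by omega), List.take_add_one]
    simp [List.getD, List.getElem?_eq_getElem (show n < t.length by omega)]

theorem getD_drop (t : List Char) (a j : Nat) (d : Char) :
    (t.drop a).getD j d = t.getD (a + j) d := by
  simp [List.getD, List.getElem?_drop]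

theorem map_range_add_getD (t : List Char) (d : Char) (a n : Nat) (h : a + n ≤ t.length) :
    (List.range n).map (fun j => t.getD (a + j) d) = (t.drop a).take n := by
  rw [← map_range_getD (t.drop a) d n (by simp; omega)]
  exact List.map_congr_left (fun j _ => (getD_drop t a j d).symm)

theorem filter_range_small (m : Nat) (h : m ≤ 5) :
    (List.range m).filter (fun j => ¬ j % 5 = 0) = (List.range (m - 1)).map (fun j => 1 + j) := by
  interval_cases m <;> decide

theorem payN_small (t : List Char) (m : Nat) (h5 : m ≤ 5) (hl : m ≤ t.length) :
    payN t m = (t.take m).drop 1 := by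
  cases m with
  | zero => simp [payN]
  | succ n =>
    unfold payN
    rw [filter_range_small (n + 1) h5, List.map_map]
    have hc : ((fun j => t.getD j ' ') ∘ fun j => 1 + j) = fun j => t.getD (1 + j) ' ' := rfl
    rw [hc, show n + 1 - 1 = n by omega, map_range_add_getD t ' ' 1 n (by omega), List.drop_take]
    simp

theorem payN_step (t : List Char) (m : Nat) (h5 : 5 ≤ m) (hl : m ≤ t.length) :
    payN t m = (t.take 5).drop 1 ++ payN (t.drop 5) (m - 5) := by
  unfold payN
  rw [show m = 5 + (m - 5) by omega, List.range_add, List.filter_append, List.map_append,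
      show 5 + (m - 5) - 5 = m - 5 by omega]
  congr 1
  · rw [show (List.range 5).filter (fun j => ¬ j % 5 = 0) = (List.range 4).map (fun j => 1 + j)
        from by decide, List.map_map]
    have : ((fun j => t.getD j ' ') ∘ fun j => 1 + j) = fun j => t.getD (1 + j) ' ' := rfl
    rw [this, map_range_add_getD t ' ' 1 4 (by omega), List.drop_take]
  · rw [List.filter_map, List.map_map]
    have hp : ((fun j => decide ¬ j % 5 = 0) ∘ fun j => 5 + j) = fun j => decide ¬ j % 5 = 0 := by
      funext j; simp [Nat.add_mod_left]
    rw [hp]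
    refine List.map_congr_left (fun j _ => ?_)
    show t.getD (5 + j) ' ' = (t.drop 5).getD j ' '
    exact (getD_drop t 5 j ' ').symm

theorem cast_mod_five (j : Nat) : ((j : Int) % 5 = 0) ↔ (j % 5 = 0) := by omega

theorem payloadB_eq_payN (t : List Char) (k : Nat) :
    payloadB t (k : Int) = payN t (min (k + 5) t.length) := by
  unfold payloadB payN
  rw [show min ((k : Int) + 5) (t.length : Int) = ((min (k + 5) t.length : Nat) : Int) by
        push_cast; omega,
      PySem.List.pyRange_zero_nat, List.filter_map, List.map_map]
  have hp : ((fun j : Int => decide ¬ j % 5 = 0) ∘ fun j : Nat => (j : Int))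
      = fun j : Nat => decide ¬ j % 5 = 0 := by
    funext j
    simp only [Function.comp_apply]
    exact decide_eq_decide.2 (not_congr (cast_mod_five j))
  rw [hp]
  refine List.map_congr_left (fun j _ => ?_)
  simp [Function.comp_apply, PySem.List.pyGetD_natCast, List.getD]

-- the step-5 range: one header index, then the rest shifted by 5
theorem pyRange5_cons (n : Nat) (hn : 0 < n) :
    PySem.List.pyRange 0 (n : Int) 5
      = 0 :: (PySem.List.pyRange 0 ((n - 5 : Nat) : Int) 5).map (· + 5) := by
  rw [PySem.List.pyRange_of_pos _ _ (by norm_num), PySem.List.pyRange_of_pos _ _ (by norm_num)]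
  have h1 : (if (0:Int) < (n:Int) then (((n:Int) - 0 + 5 - 1)/5).toNat else 0)
      = (if (0:Int) < ((n - 5 : Nat):Int) then ((((n - 5 : Nat):Int) - 0 + 5 - 1)/5).toNat else 0) + 1 := by
    split_ifs with h2 h3 <;> push_cast <;> omega
  rw [h1, List.range_succ_eq_map]
  simp only [List.map_cons, List.map_map]
  refine congrArg₂ _ (by norm_num) (List.map_congr_left ?_)
  intro j _
  simp only [Function.comp_apply]
  push_cast; ring

theorem pyGetD_shift (t : List Char) (i : Int) (hi : 0 ≤ i) :
    PySem.List.pyGetD t (i + 5) ' ' = PySem.List.pyGetD (t.drop 5) i ' ' := by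
  obtain ⟨n, rfl⟩ := Int.eq_ofNat_of_zero_le hi
  rw [show ((n : Int) + 5) = ((n + 5 : Nat) : Int) by push_cast; ring,
      PySem.List.pyGetD_natCast, PySem.List.pyGetD_natCast]
  simp [List.getD, List.getElem?_drop, Nat.add_comm]

theorem findTerm_shift (ks : List Int) (t : List Char) (h : ∀ i ∈ ks, 0 ≤ i) :
    findTerm (ks.map (· + 5)) t = (findTerm ks (t.drop 5)).map (· + 5) := by
  induction ks with
  | nil => rfl
  | cons k ks ih =>
    simp only [List.map_cons, findTerm, pyGetD_shift t k (h k (by simp))]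
    split_ifs with hk
    · rfl
    · exact ih (fun i hi => h i (by simp [hi]))

theorem find_main (t : List Char) (k : Nat) (hk : k < t.length) (h5 : k % 5 = 0)
    (h0 : t[k]? = some '0') (hfst : ∀ j, j < k → j % 5 = 0 → t[j]? ≠ some '0') :
    findTerm (PySem.List.pyRange 0 (t.length : Int) 5) t = some (k : Int) := by
  rw [pyRange5_cons t.length (by omega)]
  simp only [findTerm]
  by_cases hh : PySem.List.pyGetD t 0 ' ' = '0'
  · rw [if_pos hh]
    have hk0 : k = 0 := by
      by_contra hne
      refine hfst 0 (by omega) (by omega) ?_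
      rw [show (0 : Int) = ((0 : Nat) : Int) by norm_num, PySem.List.pyGetD_natCast] at hh
      cases t with
      | nil => simp at hk
      | cons c cs => simpa using congrArg some hh
    simp [hk0]
  · rw [if_neg hh]
    have hkne : k ≠ 0 := by
      intro h; subst h
      apply hh
      rw [show (0 : Int) = ((0 : Nat) : Int) by norm_num, PySem.List.pyGetD_natCast]
      cases t with
      | nil => simp at hk
      | cons c cs => simpa using (Option.some_injective _ h0)
    have hlen : (t.drop 5).length = t.length - 5 := by simp
    have ih := find_main (t.drop 5) (k - 5) (by omega) (by omega)
      (by rw [List.getElem?_drop, show 5 + (k - 5) = k by omega]; exact h0)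
      (fun j hj hj5 => by
        rw [List.getElem?_drop]
        exact hfst (5 + j) (by omega) (by omega))
    rw [show t.length - 5 = (t.drop 5).length by omega, findTerm_shift _ _
      (fun i hi => by
        rw [PySem.List.pyRange_of_pos _ _ (by norm_num)] at hi
        obtain ⟨j, -, rfl⟩ := List.mem_map.1 hi
        positivity), ih]
    simp only [Option.map_some]
    congr 1
    omega
termination_by k
decreasing_by omega

theorem pySplit_cons (t : List Char) (ht : t ≠ []) :
    pySplit t 5 = t.take 5 :: pySplit (t.drop 5) 5 := by
  unfold pySplit
  rw [PySem.List.pyRange_of_pos _ _ (by norm_num), PySem.List.pyRange_of_pos _ _ (by norm_num)]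
  have hlen : t.length ≠ 0 := by simpa using ht
  rw [List.length_drop]
  have h1 : (if (0:Int) < (t.length:Int) then (((t.length:Int) - 0 + 5 - 1)/5).toNat else 0)
      = (if (0:Int) < ((t.length - 5 : Nat):Int) then ((((t.length - 5 : Nat):Int) - 0 + 5 - 1)/5).toNat else 0) + 1 := by
    split_ifs with h2 h3 <;> push_cast <;> omega
  rw [h1, List.range_succ_eq_map]
  simp only [List.map_cons, List.map_map]
  refine congrArg₂ _ ?_ (List.map_congr_left ?_)
  · norm_num
    rw [show ((5:Int)) = ((5:Nat):Int) by norm_num, PySem.List.slice_to_natCast]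
  · intro k _
    simp only [Function.comp_apply]
    rw [show (0 + 5 * ((Nat.succ k : Nat):Int)) = ((5*k+5 : Nat):Int) by push_cast; ring,
        show (((5*k+5 : Nat):Int) + 5) = ((5*k+10 : Nat):Int) by push_cast; ring,
        show (0 + 5 * ((k : Nat):Int)) = ((5*k : Nat):Int) by push_cast; ring,
        show (((5*k : Nat):Int) + 5) = ((5*k+5 : Nat):Int) by push_cast; ring,
        PySem.List.slice_natCast, PySem.List.slice_natCast, List.drop_drop,
        show 5 + 5*k = 5*k+5 from by omega, show 5*k+10 - (5*k+5) = 5*k+5-5*k from by omega]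

theorem flatten_pySplit (t : List Char) : (pySplit t 5).flatten = t := by
  by_cases ht : t = []
  · subst ht; decide
  · have hlen : t.length ≠ 0 := by simpa using ht
    rw [pySplit_cons t ht, List.flatten_cons, flatten_pySplit (t.drop 5), List.take_append_drop]
termination_by t.length
decreasing_by simp [List.length_drop]; omega

theorem loopA_main (t : List Char) (acc : List Char) (k : Nat) (hk : k < t.length)
    (h5 : k % 5 = 0) (h0 : t[k]? = some '0')
    (hfst : ∀ j, j < k → j % 5 = 0 → t[j]? ≠ some '0') :
    litLoopA (pySplit t 5) acc [] = (acc ++ payN t (min (k + 5) t.length), t.drop (k + 5)) := by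
  have ht : t ≠ [] := by intro h; subst h; simp at hk
  rw [pySplit_cons t ht]
  simp only [litLoopA, PySem.List.slice_from_one]
  by_cases hh : PySem.List.pyGetD (t.take 5) 0 ' ' = '0'
  · rw [if_pos hh]
    have hk0 : k = 0 := by
      by_contra hne
      refine hfst 0 (by omega) (by omega) ?_
      rw [show (0 : Int) = ((0 : Nat) : Int) by norm_num, PySem.List.pyGetD_natCast] at hh
      cases t with
      | nil => simp at hk
      | cons c cs => simpa using congrArg some hh
    subst hk0
    rw [flatten_pySplit]
    have htake : t.take 5 = t.take (min 5 t.length) := by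
      rw [List.take_eq_take_iff]; omega
    rw [payN_small t (min 5 t.length) (by omega) (by omega), ← htake, List.drop_one]
  · rw [if_neg hh]
    have hkne : k ≠ 0 := by
      intro h; subst h
      apply hh
      rw [show (0 : Int) = ((0 : Nat) : Int) by norm_num, PySem.List.pyGetD_natCast]
      cases t with
      | nil => simp at hk
      | cons c cs => simpa using (Option.some_injective _ h0)
    have hlen : (t.drop 5).length = t.length - 5 := by simp
    have hk5 : 5 ≤ k := by omega
    have ih := loopA_main (t.drop 5) (acc ++ (t.take 5).tail) (k - 5) (by omega) (by omega)
      (by rw [List.getElem?_drop, show 5 + (k - 5) = k by omega]; exact h0)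
      (fun j hj hj5 => by
        rw [List.getElem?_drop]
        exact hfst (5 + j) (by omega) (by omega))
    rw [ih, payN_step t (min (k + 5) t.length) (by omega) (by omega)]
    have hm : min (k + 5) t.length - 5 = min (k - 5 + 5) (t.drop 5).length := by
      rw [hlen]; omega
    rw [← hm, List.drop_drop, show (t.take 5).tail = (t.take 5).drop 1 from List.drop_one.symm,
        List.append_assoc, show 5 + (k - 5 + 5) = k + 5 by omega]
termination_by k
decreasing_by omega

-- ===== VERDICT (by name: the statement is the Claim_ definition above) =====
theorem literal_spec : Claim_equal_literal := by
  intro rest _hdom hpre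
  obtain ⟨k, h1, h2, h3, h4, -, -⟩ := hpre
  unfold Spec_literal literal literal_alt
  rw [find_main rest.toList k h1 h2 h3 h4]
  simp only
  rw [payloadB_eq_payN, loopA_main rest.toList [] k h1 h2 h3 h4, List.nil_append,
      show ((k : Int) + 5) = ((k + 5 : Nat) : Int) by push_cast; ring,
      PySem.List.slice_from_natCast]
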